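-- pv_equiv track=rewrite | github.com/GustavoPR35/Calculadora-de-derivadas | TCalculo.py | exibirDerivada
-- ===== SOURCE A (Python) =====
-- def exibirPolinomio(coeficientes, expoentes):
--   termos = []
--
--   for coeficiente, expoente in zip(coeficientes, expoentes):
--
--       cont = 0
--       aux = 0
--       for i in expoentes:
--         if i != 0:
--           cont += 1
--       if cont == 0:
--         for i in coeficientes:
--           aux += i
--         return aux
--
--       if coeficiente == 0:
--           continue
--
--       if expoente == 0:
--           termos.append(f"{coeficiente}")
--
--       elif expoente == 1:
--           if coeficiente == 1:
--               termos.append("x")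
--           elif coeficiente == -1:
--               termos.append("-x")
--           else:
--               termos.append(f"{coeficiente}x")
--
--       else:
--           if coeficiente == 1:
--               termos.append(f"x^{expoente}")
--           elif coeficiente == -1:
--               termos.append(f"-x^{expoente}")
--           else:
--               termos.append(f"{coeficiente}x^{expoente}")
--
--   polinomio = " + ".join(termos)
--   polinomio = polinomio.replace("+ -", "- ")
--
--   return polinomio
--
-- def calcularDerivada(coeficientes, expoentes):
--   d_coeficientes = []
--   d_expoentes = []
--   for coeficiente, expoente in zip(coeficientes, expoentes):
--       if expoente == 0:
--           continue
--       d_coeficientes.append(expoente * coeficiente)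
--       d_expoentes.append(expoente - 1)
--   return d_coeficientes, d_expoentes
--
-- def exibirDerivada(coeficientes, expoentes):
--   d_coeficientes, d_expoentes = calcularDerivada(coeficientes, expoentes)
--
--   cont = 0
--   for i in d_expoentes:
--     if i != 0:
--       cont += 1
--   if cont == 0:
--     return "0"
--
--   derivada = exibirPolinomio(d_coeficientes, d_expoentes)
--   return derivada
-- ===== SOURCE B (Python) =====
-- def exibirDerivada(coeficientes, expoentes):
--     # One pass over zip(coeficientes, expoentes): derive, detect a non-constant
--     # derivative, and format each term directly (no intermediate derivative lists).
--     termos = []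
--     tem_x = False
--     for coeficiente, expoente in zip(coeficientes, expoentes):
--         if expoente == 0:
--             continue
--         if expoente != 1:
--             tem_x = True
--         dcoef = expoente * coeficiente
--         dexp = expoente - 1
--         if dcoef == 0:
--             continue
--         if dexp == 0:
--             termos.append(f"{dcoef}")
--         elif dexp == 1:
--             if dcoef == 1:
--                 termos.append("x")
--             elif dcoef == -1:
--                 termos.append("-x")
--             else:
--                 termos.append(f"{dcoef}x")
--         else:
--             if dcoef == 1:
--                 termos.append(f"x^{dexp}")
--             elif dcoef == -1:
--                 termos.append(f"-x^{dexp}")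
--             else:
--                 termos.append(f"{dcoef}x^{dexp}")
--     if not tem_x:
--         return "0"
--     return " + ".join(termos).replace("+ -", "- ")
-- ===== Notes on version B (the rewrite author's own statement) =====
-- stated objective: faster
-- what changed: Single pass over zip(coeficientes, expoentes) that derives, detects a non-constant derivative via a flag and formats terms directly, removing the intermediate d_coeficientes/d_expoentes lists, the separate counting scan and the per-iteration re-count inside exibirPolinomio.
import Mathlib
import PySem

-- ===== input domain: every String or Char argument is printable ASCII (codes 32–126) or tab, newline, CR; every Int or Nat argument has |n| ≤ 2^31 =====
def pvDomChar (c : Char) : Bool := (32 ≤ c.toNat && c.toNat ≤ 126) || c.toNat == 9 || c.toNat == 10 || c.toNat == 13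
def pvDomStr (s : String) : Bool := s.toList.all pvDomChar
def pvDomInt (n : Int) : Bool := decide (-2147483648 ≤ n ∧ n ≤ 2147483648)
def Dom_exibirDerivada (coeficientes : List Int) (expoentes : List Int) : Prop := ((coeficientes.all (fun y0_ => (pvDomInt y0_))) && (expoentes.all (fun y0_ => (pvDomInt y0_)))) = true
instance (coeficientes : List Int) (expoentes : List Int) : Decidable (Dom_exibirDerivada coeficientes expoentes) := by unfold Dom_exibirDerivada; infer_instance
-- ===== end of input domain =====

-- B replaces A's three scans (derive into two lists, count nonzero exponents,
-- re-scan and format) by one pass over the zipped input with a flag; same output.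

-- ===== PORT A =====

-- calcularDerivada: builds the two derivative lists in input order
def pvCalcLoop : List (Int × Int) → List Int × List Int
  | [] => ([], [])
  | (c, e) :: rest =>
      if e = 0 then pvCalcLoop rest
      else
        let r := pvCalcLoop rest
        (e * c :: r.1, (e - 1) :: r.2)

-- 'cont = 0; for i in l: if i != 0: cont += 1'
def pvCountNZ (l : List Int) : Int :=
  l.foldl (fun acc i => if i ≠ 0 then acc + 1 else acc) 0

-- the loop of exibirPolinomio over zip(coeficientes, expoentes), accumulating termos
def pvPolyLoop (coefs exps : List Int) : List (Int × Int) → List String → String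
  | [], termos => PySem.Str.replace (PySem.Str.join " + " termos) "+ -" "- "
  | (c, e) :: rest, termos =>
      if pvCountNZ exps = 0 then
        -- Python returns the int sum of coefficients here; rendered via toStr because this
        -- branch is unreachable from exibirDerivada (its caller guarantees pvCountNZ exps ≠ 0)
        PySem.Int.toStr (coefs.foldl (· + ·) 0)
      else if c = 0 then pvPolyLoop coefs exps rest termos
      else if e = 0 then pvPolyLoop coefs exps rest (termos ++ [PySem.Int.toStr c])
      else if e = 1 then
        pvPolyLoop coefs exps rest
          (termos ++ [if c = 1 then "x" else if c = -1 then "-x" else PySem.Int.toStr c ++ "x"])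
      else
        pvPolyLoop coefs exps rest
          (termos ++ [if c = 1 then "x^" ++ PySem.Int.toStr e
                      else if c = -1 then "-x^" ++ PySem.Int.toStr e
                      else PySem.Int.toStr c ++ "x^" ++ PySem.Int.toStr e])

def pvExibirPolinomio (coefs exps : List Int) : String :=
  pvPolyLoop coefs exps (coefs.zip exps) []

def exibirDerivada (coeficientes : List Int) (expoentes : List Int) : String :=
  let d := pvCalcLoop (coeficientes.zip expoentes)
  if pvCountNZ d.2 = 0 then "0"
  else pvExibirPolinomio d.1 d.2

-- ===== PORT B =====

-- B's single loop: state = (termos so far, tem_x flag)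
def pvAltLoop : List (Int × Int) → List String → Bool → List String × Bool
  | [], termos, temX => (termos, temX)
  | (c, e) :: rest, termos, temX =>
      if e = 0 then pvAltLoop rest termos temX
      else
        let temX' := if e ≠ 1 then true else temX
        let dc := e * c
        let de := e - 1
        if dc = 0 then pvAltLoop rest termos temX'
        else if de = 0 then pvAltLoop rest (termos ++ [PySem.Int.toStr dc]) temX'
        else if de = 1 then
          pvAltLoop rest
            (termos ++ [if dc = 1 then "x" else if dc = -1 then "-x" else PySem.Int.toStr dc ++ "x"]) temX'
        else
          pvAltLoop rest
            (termos ++ [if dc = 1 then "x^" ++ PySem.Int.toStr de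
                        else if dc = -1 then "-x^" ++ PySem.Int.toStr de
                        else PySem.Int.toStr dc ++ "x^" ++ PySem.Int.toStr de]) temX'

def exibirDerivada_alt (coeficientes : List Int) (expoentes : List Int) : String :=
  let r := pvAltLoop (coeficientes.zip expoentes) [] false
  if r.2 then PySem.Str.replace (PySem.Str.join " + " r.1) "+ -" "- "
  else "0"

-- ===== PRECONDITION & SPEC =====
def Spec_exibirDerivada (coeficientes : List Int) (expoentes : List Int) (out : String) : Prop := out = exibirDerivada_alt coeficientes expoentes
instance (coeficientes : List Int) (expoentes : List Int) (out : String) : Decidable (Spec_exibirDerivada coeficientes expoentes out) := by unfold Spec_exibirDerivada; infer_instance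

-- ===== CLAIM (what is proved, stated in full; the proofs are below) =====
def Claim_equal_exibirDerivada : Prop := ∀ (coeficientes : List Int) (expoentes : List Int), Dom_exibirDerivada coeficientes expoentes → Spec_exibirDerivada coeficientes expoentes (exibirDerivada coeficientes expoentes)

-- ===== LEMMAS AND PROOFS =====

-- derivative pairs (dcoef, dexp), the common intermediate of both proofs
def pvDP (ps : List (Int × Int)) : List (Int × Int) :=
  ps.filterMap (fun p => if p.2 = 0 then none else some (p.2 * p.1, p.2 - 1))

-- formatting of one derivative pair (none = skipped)
def pvFmt (p : Int × Int) : Option String :=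
  if p.1 = 0 then none
  else some (if p.2 = 0 then PySem.Int.toStr p.1
             else if p.2 = 1 then
               (if p.1 = 1 then "x" else if p.1 = -1 then "-x" else PySem.Int.toStr p.1 ++ "x")
             else
               (if p.1 = 1 then "x^" ++ PySem.Int.toStr p.2
                else if p.1 = -1 then "-x^" ++ PySem.Int.toStr p.2
                else PySem.Int.toStr p.1 ++ "x^" ++ PySem.Int.toStr p.2))

theorem pvCalcLoop_eq (ps : List (Int × Int)) :
    pvCalcLoop ps = ((pvDP ps).map Prod.fst, (pvDP ps).map Prod.snd) := by
  induction ps with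
  | nil => rfl
  | cons p rest ih =>
    obtain ⟨c, e⟩ := p
    by_cases he : e = 0 <;> simp [pvCalcLoop, pvDP, he] at ih ⊢ <;> simp [ih]

theorem pvCountNZ_eq (l : List Int) : pvCountNZ l = (l.countP (fun i => decide (i ≠ 0)) : Int) := by
  simpa [pvCountNZ] using PySem.List.foldl_count_if (fun i : Int => decide (i ≠ 0)) l 0

theorem pvAltLoop_snd (ps : List (Int × Int)) (ts : List String) (f : Bool) :
    (pvAltLoop ps ts f).2 = (f || ps.any (fun p => decide (p.2 ≠ 0) && decide (p.2 ≠ 1))) := by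
  induction ps generalizing ts f with
  | nil => simp [pvAltLoop]
  | cons p rest ih =>
    obtain ⟨c, e⟩ := p
    by_cases he : e = 0
    · simp [pvAltLoop, he, ih]
    · by_cases he1 : e = 1 <;>
        simp only [pvAltLoop, if_neg he, he1] <;>
        split_ifs <;> simp [ih, he, he1] <;> cases f <;> simp <;> (exfalso; omega)

set_option maxHeartbeats 2000000 in
theorem pvAltLoop_fst (ps : List (Int × Int)) (ts : List String) (f : Bool) :
    (pvAltLoop ps ts f).1 = ts ++ (pvDP ps).filterMap pvFmt := by
  induction ps generalizing ts f with
  | nil => simp [pvAltLoop, pvDP]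
  | cons p rest ih =>
    obtain ⟨c, e⟩ := p
    by_cases he : e = 0
    · have hstep : pvAltLoop ((c, e) :: rest) ts f = pvAltLoop rest ts f := by
        simp [pvAltLoop, he]
      have hdp : pvDP ((c, e) :: rest) = pvDP rest := by simp [pvDP, he]
      rw [hstep, ih, hdp]
    · have hdp : pvDP ((c, e) :: rest) = (e * c, e - 1) :: pvDP rest := by simp [pvDP, he]
      by_cases hdc : e * c = 0
      · have hstep : pvAltLoop ((c, e) :: rest) ts f =
            pvAltLoop rest ts (if e ≠ 1 then true else f) := by
          simp [pvAltLoop, he, hdc]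
        have hf : pvFmt (e * c, e - 1) = none := by simp [pvFmt, hdc]
        rw [hstep, ih, hdp, List.filterMap_cons_none hf]
      · by_cases hde0 : e - 1 = 0
        · have hf : pvFmt (e * c, e - 1) = some (PySem.Int.toStr (e * c)) := by
            simp [pvFmt, hdc, hde0]
          have hstep : pvAltLoop ((c, e) :: rest) ts f =
              pvAltLoop rest (ts ++ [PySem.Int.toStr (e * c)]) (if e ≠ 1 then true else f) := by
            simp [pvAltLoop, he, hdc, hde0]
          rw [hstep, ih, hdp, List.filterMap_cons_some hf, List.append_assoc,
              List.singleton_append]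
        · by_cases hde1 : e - 1 = 1
          · have hf : pvFmt (e * c, e - 1) =
                some (if e * c = 1 then "x" else if e * c = -1 then "-x"
                      else PySem.Int.toStr (e * c) ++ "x") := by
              simp [pvFmt, hdc, hde1]
            have hstep : pvAltLoop ((c, e) :: rest) ts f =
                pvAltLoop rest
                  (ts ++ [if e * c = 1 then "x" else if e * c = -1 then "-x"
                          else PySem.Int.toStr (e * c) ++ "x"]) (if e ≠ 1 then true else f) := by
              simp [pvAltLoop, he, hdc, hde1]
            rw [hstep, ih, hdp, List.filterMap_cons_some hf, List.append_assoc,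
                List.singleton_append]
          · have hf : pvFmt (e * c, e - 1) =
                some (if e * c = 1 then "x^" ++ PySem.Int.toStr (e - 1)
                      else if e * c = -1 then "-x^" ++ PySem.Int.toStr (e - 1)
                      else PySem.Int.toStr (e * c) ++ "x^" ++ PySem.Int.toStr (e - 1)) := by
              simp [pvFmt, hdc, hde0, hde1]
            have hstep : pvAltLoop ((c, e) :: rest) ts f =
                pvAltLoop rest
                  (ts ++ [if e * c = 1 then "x^" ++ PySem.Int.toStr (e - 1)
                          else if e * c = -1 then "-x^" ++ PySem.Int.toStr (e - 1)
                          else PySem.Int.toStr (e * c) ++ "x^" ++ PySem.Int.toStr (e - 1)])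
                  (if e ≠ 1 then true else f) := by
              simp [pvAltLoop, he, hdc, hde0, hde1]
            rw [hstep, ih, hdp, List.filterMap_cons_some hf, List.append_assoc,
                List.singleton_append]

set_option maxHeartbeats 2000000 in
theorem pvPolyLoop_eq (coefs exps : List Int) (h : pvCountNZ exps ≠ 0)
    (pairs : List (Int × Int)) (ts : List String) :
    pvPolyLoop coefs exps pairs ts =
      PySem.Str.replace (PySem.Str.join " + " (ts ++ pairs.filterMap pvFmt)) "+ -" "- " := by
  induction pairs generalizing ts with
  | nil => simp [pvPolyLoop]
  | cons p rest ih =>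
    obtain ⟨c, e⟩ := p
    by_cases hc0 : c = 0
    · have hstep : pvPolyLoop coefs exps ((c, e) :: rest) ts = pvPolyLoop coefs exps rest ts := by
        simp [pvPolyLoop, h, hc0]
      have hf : pvFmt (c, e) = none := by simp [pvFmt, hc0]
      rw [hstep, ih, List.filterMap_cons_none hf]
    · by_cases he0 : e = 0
      · have hf : pvFmt (c, e) = some (PySem.Int.toStr c) := by simp [pvFmt, hc0, he0]
        have hstep : pvPolyLoop coefs exps ((c, e) :: rest) ts =
            pvPolyLoop coefs exps rest (ts ++ [PySem.Int.toStr c]) := by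
          simp [pvPolyLoop, h, hc0, he0]
        rw [hstep, ih, List.filterMap_cons_some hf, List.append_assoc, List.singleton_append]
      · by_cases he1 : e = 1
        · have hf : pvFmt (c, e) =
              some (if c = 1 then "x" else if c = -1 then "-x" else PySem.Int.toStr c ++ "x") := by
            simp [pvFmt, hc0, he1]
          have hstep : pvPolyLoop coefs exps ((c, e) :: rest) ts =
              pvPolyLoop coefs exps rest
                (ts ++ [if c = 1 then "x" else if c = -1 then "-x"
                        else PySem.Int.toStr c ++ "x"]) := by
            simp [pvPolyLoop, h, hc0, he1]
          rw [hstep, ih, List.filterMap_cons_some hf, List.append_assoc, List.singleton_append]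
        · have hf : pvFmt (c, e) =
              some (if c = 1 then "x^" ++ PySem.Int.toStr e
                    else if c = -1 then "-x^" ++ PySem.Int.toStr e
                    else PySem.Int.toStr c ++ "x^" ++ PySem.Int.toStr e) := by
            simp [pvFmt, hc0, he0, he1]
          have hstep : pvPolyLoop coefs exps ((c, e) :: rest) ts =
              pvPolyLoop coefs exps rest
                (ts ++ [if c = 1 then "x^" ++ PySem.Int.toStr e
                        else if c = -1 then "-x^" ++ PySem.Int.toStr e
                        else PySem.Int.toStr c ++ "x^" ++ PySem.Int.toStr e]) := by
            simp [pvPolyLoop, h, hc0, he0, he1]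
          rw [hstep, ih, List.filterMap_cons_some hf, List.append_assoc, List.singleton_append]

theorem pvCont_flag (ps : List (Int × Int)) :
    (pvCountNZ ((pvDP ps).map Prod.snd) = 0) ↔
      (ps.any (fun p => decide (p.2 ≠ 0) && decide (p.2 ≠ 1)) = false) := by
  rw [pvCountNZ_eq, Int.natCast_eq_zero, List.countP_eq_zero]
  simp only [List.any_eq_false, pvDP, List.mem_map, List.mem_filterMap]
  constructor
  · intro h p hp
    by_cases he : p.2 = 0
    · simp [he]
    · have := h (p.2 - 1) ⟨(p.2 * p.1, p.2 - 1), ⟨p, hp, by simp [he]⟩, rfl⟩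
      simp at this ⊢
      omega
  · intro h x hx
    obtain ⟨q, ⟨p, hp, hq⟩, hsnd⟩ := hx
    have := h p hp
    by_cases he : p.2 = 0
    · simp [he] at hq
    · simp [he] at hq this
      simp [← hsnd, ← hq]
      omega

-- ===== VERDICT (by name: the statement is the Claim_ definition above) =====
theorem exibirDerivada_spec : Claim_equal_exibirDerivada := by
  intro coefs exps _
  unfold Spec_exibirDerivada
  simp only [exibirDerivada, exibirDerivada_alt]
  rw [pvCalcLoop_eq, pvAltLoop_fst, pvAltLoop_snd]
  by_cases hc : pvCountNZ ((pvDP (coefs.zip exps)).map Prod.snd) = 0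
  · have hfl := (pvCont_flag _).mp hc
    rw [if_pos hc, hfl]
    simp
  · have hflag : (coefs.zip exps).any (fun p => decide (p.2 ≠ 0) && decide (p.2 ≠ 1)) = true := by
      rcases Bool.eq_false_or_eq_true ((coefs.zip exps).any (fun p => decide (p.2 ≠ 0) && decide (p.2 ≠ 1))) with h | h
      · exact h
      · exact absurd ((pvCont_flag _).mpr h) hc
    simp only [hc, if_false, hflag, Bool.false_or, if_true, pvExibirPolinomio]
    rw [List.zip_map']
    simp only [Prod.mk.eta]
    rw [pvPolyLoop_eq _ _ hc]
    simp
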